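-- pv_equiv track=rewrite | github.com/Dans-labs/dariah-contrib | server/control/utils.py | thinM
-- ===== SOURCE A (Python) =====
-- def thinM(chunks):
--     """Auxiliary in provenance filtering: weed out the non-last  items per day."""
--
--     modified = []
--     nChunks = len(chunks)
--     for (i, chunk) in enumerate(chunks):
--         isLast = i == nChunks - 1
--         people = {}
--         for m in chunk:
--             people.setdefault(m[0], []).append(m[1])
--         thinned = []
--         for (p, dates) in people.items():
--             thinned.append((p, sorted(dates)[-1]))
--         for m in sorted(thinned, key=lambda x: x[1]):
--             modified.append((m, 2 if isLast else 1))
--     return modified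
-- ===== SOURCE B (Python) =====
-- def thinM(chunks):
--     """Auxiliary in provenance filtering: weed out the non-last items per day."""
--
--     out = []
--     last = len(chunks) - 1
--     for (i, chunk) in enumerate(chunks):
--         tag = 2 if i == last else 1
--         # sort-based grouping: order the decorated entries by (person, position),
--         # then one linear scan over adjacent runs yields (latestDate, firstPos, person)
--         rows = sorted(((p, j, d) for (j, (p, d)) in enumerate(chunk)),
--                       key=lambda r: (r[0], r[1]))
--         recs = []
--         cur = None  # (best, first, person) of the run being scanned
--         for (p, j, d) in rows:
--             if cur is not None and p == cur[2]:
--                 cur = (d if cur[0] < d else cur[0], cur[1], cur[2])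
--             else:
--                 if cur is not None:
--                     recs.append(cur)
--                 cur = (d, j, p)
--         if cur is not None:
--             recs.append(cur)
--         for r in sorted(recs, key=lambda r: (r[0], r[1])):
--             out.append(((r[2], r[0]), tag))
--     return out
-- ===== Notes on version B (the rewrite author's own statement) =====
-- stated objective: alternative
-- what changed: Replaces A's hash-grouping (dict of per-person date lists, then a reduce pass sorting each list) by dict-free sort-based grouping: decorate each entry with its position, sort by (person, position), collapse adjacent runs in one linear scan into (latestDate, firstPosition, person) records, and sort those by (date, firstPosition) — the explicit position key reproduces A's stable-sort/insertion-order tie-breaking.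
import Mathlib
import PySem

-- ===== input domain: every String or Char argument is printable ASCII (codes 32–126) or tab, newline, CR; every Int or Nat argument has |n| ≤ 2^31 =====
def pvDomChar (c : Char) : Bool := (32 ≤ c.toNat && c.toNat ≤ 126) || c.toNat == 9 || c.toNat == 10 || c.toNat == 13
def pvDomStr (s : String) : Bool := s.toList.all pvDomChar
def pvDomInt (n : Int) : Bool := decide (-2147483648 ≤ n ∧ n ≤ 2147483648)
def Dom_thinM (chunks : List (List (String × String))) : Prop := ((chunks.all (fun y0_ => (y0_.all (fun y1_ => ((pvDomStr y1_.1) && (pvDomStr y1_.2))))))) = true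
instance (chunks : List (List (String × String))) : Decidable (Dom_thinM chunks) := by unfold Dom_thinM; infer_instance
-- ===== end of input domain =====

-- B replaces A's hash grouping (dict person → list of dates, then a reduce pass sorting
-- each list) by dict-free sort-based grouping: decorate entries with their position, sort
-- by (person, position), collapse adjacent runs in one scan, sort records by (date, position).

-- ===== PORT A =====
-- literal transliteration of A. 'sorted(dates)[-1]' is ported with pyGetD; the default ""
-- is never used because every dates list in the dict is nonempty (built by appending).
def thinM (chunks : List (List (String × String))) : List ((String × String) × Int) :=
  let nChunks : Int := chunks.length
  (PySem.List.enumerate chunks).foldl (fun modified ic =>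
    let isLast : Bool := ic.1 == nChunks - 1
    let people : PySem.Dict String (List String) :=
      ic.2.foldl (fun d m => d.modify m.1 [] (· ++ [m.2])) PySem.Dict.empty
    let thinned : List (String × String) :=
      people.items.foldl (fun acc pd =>
        acc ++ [(pd.1, PySem.List.pyGetD (PySem.List.sorted pd.2 (fun x => x) false) (-1) "")]) []
    (PySem.List.sorted thinned (fun x => x.2) false).foldl
      (fun acc m => acc ++ [(m, if isLast then (2 : Int) else 1)]) modified) []

-- ===== PORT B =====
-- Source B's run-collapsing loop: state = (recs so far, current run 'cur' as (best, first, person))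
def pvStep (st : List (String × Int × String) × Option (String × Int × String))
    (r : String × Int × String) : List (String × Int × String) × Option (String × Int × String) :=
  match st.2 with
  | some c =>
      if r.1 == c.2.2 then (st.1, some ((if c.1 < r.2.2 then r.2.2 else c.1), c.2.1, c.2.2))
      else (st.1 ++ [c], some (r.2.2, r.2.1, r.1))
  | none => (st.1, some (r.2.2, r.2.1, r.1))

-- Source B's trailing 'if cur is not None: recs.append(cur)'
def pvClose (st : List (String × Int × String) × Option (String × Int × String)) :
    List (String × Int × String) :=
  match st.2 with
  | some c => st.1 ++ [c]
  | none => st.1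

def pvGroup (rows : List (String × Int × String)) : List (String × Int × String) :=
  pvClose (rows.foldl pvStep ([], none))

def thinM_alt (chunks : List (List (String × String))) : List ((String × String) × Int) :=
  let last : Int := chunks.length - 1
  (PySem.List.enumerate chunks).foldl (fun out ic =>
    let tag : Int := if ic.1 == last then 2 else 1
    let rows : List (String × Int × String) :=
      PySem.List.sorted2 ((PySem.List.enumerate ic.2).map (fun jm => (jm.2.1, jm.1, jm.2.2)))
        (fun r => r.1) (fun r => r.2.1) false
    let recs : List (String × Int × String) := pvGroup rows
    (PySem.List.sorted2 recs (fun r => r.1) (fun r => r.2.1) false).foldl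
      (fun acc r => acc ++ [((r.2.2, r.1), tag)]) out) []

-- ===== PRECONDITION & SPEC =====
-- A is total: every dates list handed to sorted(...)[-1] is nonempty, so no Pre_ is needed.
def Spec_thinM (chunks : List (List (String × String))) (out : List ((String × String) × Int)) : Prop := out = thinM_alt chunks
instance (chunks : List (List (String × String))) (out : List ((String × String) × Int)) : Decidable (Spec_thinM chunks out) := by unfold Spec_thinM; infer_instance

-- ===== CLAIM (what is proved, stated in full; the proofs are below) =====
def Claim_equal_thinM : Prop := ∀ (chunks : List (List (String × String))), Dom_thinM chunks → Spec_thinM chunks (thinM chunks)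

-- ===== LEMMAS AND PROOFS =====

-- chunk-level abstractions (proof-only)
def pvDec (chunk : List (String × String)) : List (String × Int × String) :=
  (PySem.List.enumerate chunk).map (fun jm => (jm.2.1, jm.1, jm.2.2))

def pvP (chunk : List (String × String)) : List String :=
  PySem.Set.ofList (chunk.map Prod.fst)

def pvGrp (chunk : List (String × String)) (p : String) : List (String × Int × String) :=
  (pvDec chunk).filter (fun r => r.1 == p)

def pvRec (chunk : List (String × String)) (p : String) : String × Int × String :=
  match pvGrp chunk p with
  | [] => ("", (0 : Int), p)
  | r :: g => (g.foldl (fun acc s => if acc < s.2.2 then s.2.2 else acc) r.2.2, r.2.1, p)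

def pvE (chunk : List (String × String)) (p : String) : String × String :=
  (p, (pvRec chunk p).1)

def pvDates (chunk : List (String × String)) (p : String) : List String :=
  (chunk.filter (fun m => m.1 == p)).map Prod.snd

-- the order both final per-chunk lists are strictly arranged by
def pvLe (chunk : List (String × String)) (a b : String × String) : Prop :=
  a.2 < b.2 ∨ (a.2 = b.2 ∧ (pvRec chunk a.1).2.1 ≤ (pvRec chunk b.1).2.1)

-- ---------- generic facts about PySem's insertion sort ----------

lemma pv_insert_stab {α κ : Type} [LinearOrder κ] (key : α → κ) (g : α → Int) (x : α) :
    ∀ acc : List α,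
      acc.Pairwise (fun a b => key a < key b ∨ (key a = key b ∧ g a < g b)) →
      (∀ y ∈ acc, g y < g x) →
      (PySem.List.insertBy (fun a b => decide (key a < key b)) x acc).Pairwise
        (fun a b => key a < key b ∨ (key a = key b ∧ g a < g b)) := by
  intro acc
  induction acc with
  | nil => intro _ _; simp [PySem.List.insertBy]
  | cons y t ih =>
    intro hp hg
    rcases List.pairwise_cons.mp hp with ⟨hy, ht⟩
    by_cases hb : (key x < key y)
    · rw [show PySem.List.insertBy (fun a b => decide (key a < key b)) x (y :: t)
          = x :: y :: t by simp [PySem.List.insertBy, hb]]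
      refine List.pairwise_cons.mpr ⟨?_, hp⟩
      intro z hz
      rcases List.mem_cons.mp hz with rfl | hz
      · exact Or.inl hb
      · rcases hy z hz with h | ⟨h, _⟩
        · exact Or.inl (hb.trans h)
        · exact Or.inl (h ▸ hb)
    · rw [show PySem.List.insertBy (fun a b => decide (key a < key b)) x (y :: t)
          = y :: PySem.List.insertBy (fun a b => decide (key a < key b)) x t by
            simp [PySem.List.insertBy, hb]]
      refine List.pairwise_cons.mpr ⟨?_, ih ht (fun z hz => hg z (List.mem_cons_of_mem _ hz))⟩
      intro z hz
      rcases (PySem.List.mem_insertBy _ _ _ _).mp hz with rfl | hz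
      · rcases lt_or_eq_of_le (not_lt.mp hb) with h | h
        · exact Or.inl h
        · exact Or.inr ⟨h, hg y (List.mem_cons_self)⟩
      · exact hy z hz

-- stability of sorted(xs, key): if xs is strictly increasing in g, the result is
-- pairwise strictly increasing in the lexicographic (key, g)
lemma pv_sorted_stab {α κ : Type} [LinearOrder κ] (key : α → κ) (g : α → Int) (xs : List α)
    (hx : xs.Pairwise (fun a b => g a < g b)) :
    (PySem.List.sorted xs key false).Pairwise
      (fun a b => key a < key b ∨ (key a = key b ∧ g a < g b)) := by
  rw [PySem.List.sorted_eq_foldl_insertBy]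
  suffices h : ∀ (l : List α) (acc : List α),
      acc.Pairwise (fun a b => key a < key b ∨ (key a = key b ∧ g a < g b)) →
      (∀ y ∈ acc, ∀ x ∈ l, g y < g x) →
      l.Pairwise (fun a b => g a < g b) →
      (l.foldl (fun acc x => PySem.List.insertBy (fun a b => decide (key a < key b)) x acc) acc).Pairwise
        (fun a b => key a < key b ∨ (key a = key b ∧ g a < g b)) by
    exact h xs [] (List.Pairwise.nil) (by simp) hx
  intro l
  induction l with
  | nil => intro acc h _ _; simpa using h
  | cons x t ih =>
    intro acc hp hg hl
    rcases List.pairwise_cons.mp hl with ⟨hx1, ht⟩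
    refine ih _ (pv_insert_stab key g x acc hp (fun y hy => hg y hy x List.mem_cons_self)) ?_ ht
    intro y hy z hz
    rcases (PySem.List.mem_insertBy _ _ _ _).mp hy with rfl | hy
    · exact hx1 z hz
    · exact hg y hy z (List.mem_cons_of_mem _ hz)

-- sorted2's insertion predicate and the lex (k1, k2) order
lemma pv_insert2 {α κ₁ κ₂ : Type} [LinearOrder κ₁] [LinearOrder κ₂]
    (k1 : α → κ₁) (k2 : α → κ₂) (x : α) :
    ∀ acc : List α,
      acc.Pairwise (fun a b => k1 a < k1 b ∨ (k1 a = k1 b ∧ k2 a ≤ k2 b)) →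
      (PySem.List.insertBy
          (fun a b => decide (k1 a < k1 b) || (!decide (k1 b < k1 a) && decide (k2 a < k2 b)))
          x acc).Pairwise (fun a b => k1 a < k1 b ∨ (k1 a = k1 b ∧ k2 a ≤ k2 b)) := by
  intro acc
  induction acc with
  | nil => intro _; simp [PySem.List.insertBy]
  | cons y t ih =>
    intro hp
    rcases List.pairwise_cons.mp hp with ⟨hy, ht⟩
    by_cases hb : (decide (k1 x < k1 y) || (!decide (k1 y < k1 x) && decide (k2 x < k2 y))) = true
    · rw [show PySem.List.insertBy _ x (y :: t) = x :: y :: t by simp [PySem.List.insertBy, hb]]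
      have hxy : k1 x < k1 y ∨ (k1 x = k1 y ∧ k2 x ≤ k2 y) := by
        simp only [Bool.or_eq_true, Bool.and_eq_true, Bool.not_eq_true', decide_eq_true_eq,
          decide_eq_false_iff_not] at hb
        rcases hb with h | ⟨h1, h2⟩
        · exact Or.inl h
        · rcases lt_or_eq_of_le (not_lt.mp h1) with h | h
          · exact Or.inl h
          · exact Or.inr ⟨h, h2.le⟩
      refine List.pairwise_cons.mpr ⟨?_, hp⟩
      intro z hz
      rcases List.mem_cons.mp hz with rfl | hz
      · exact hxy
      · -- transitivity of the lex order
        rcases hxy with h | ⟨h1, h2⟩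
        · rcases hy z hz with h' | ⟨h1', _⟩
          · exact Or.inl (h.trans h')
          · exact Or.inl (h1' ▸ h)
        · rcases hy z hz with h' | ⟨h1', h2'⟩
          · exact Or.inl (h1 ▸ h')
          · exact Or.inr ⟨h1.trans h1', h2.trans h2'⟩
    · rw [show PySem.List.insertBy
            (fun a b => decide (k1 a < k1 b) || (!decide (k1 b < k1 a) && decide (k2 a < k2 b)))
            x (y :: t)
          = y :: PySem.List.insertBy
            (fun a b => decide (k1 a < k1 b) || (!decide (k1 b < k1 a) && decide (k2 a < k2 b)))
            x t by simp [PySem.List.insertBy, hb]]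
      have hyx : k1 y < k1 x ∨ (k1 y = k1 x ∧ k2 y ≤ k2 x) := by
        simp only [Bool.or_eq_true, Bool.and_eq_true, Bool.not_eq_true', decide_eq_true_eq,
          decide_eq_false_iff_not, not_or, not_and] at hb
        rcases hb with ⟨h1, h2⟩
        rcases lt_or_eq_of_le (not_lt.mp h1) with h | h
        · exact Or.inl h
        · exact Or.inr ⟨h, not_lt.mp (h2 (by rw [h]; exact lt_irrefl _))⟩
      refine List.pairwise_cons.mpr ⟨?_, ih ht⟩
      intro z hz
      rcases (PySem.List.mem_insertBy _ _ _ _).mp hz with rfl | hz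
      · exact hyx
      · exact hy z hz

lemma pv_sorted2_pairwise {α κ₁ κ₂ : Type} [LinearOrder κ₁] [LinearOrder κ₂]
    (xs : List α) (k1 : α → κ₁) (k2 : α → κ₂) :
    (PySem.List.sorted2 xs k1 k2 false).Pairwise
      (fun a b => k1 a < k1 b ∨ (k1 a = k1 b ∧ k2 a ≤ k2 b)) := by
  show (List.foldl (fun acc x => PySem.List.insertBy
      (fun a b => decide (k1 a < k1 b) || (!decide (k1 b < k1 a) && decide (k2 a < k2 b))) x acc)
      [] xs).Pairwise _
  suffices h : ∀ (l : List α) (acc : List α),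
      acc.Pairwise (fun a b => k1 a < k1 b ∨ (k1 a = k1 b ∧ k2 a ≤ k2 b)) →
      (l.foldl (fun acc x => PySem.List.insertBy
        (fun a b => decide (k1 a < k1 b) || (!decide (k1 b < k1 a) && decide (k2 a < k2 b))) x acc)
        acc).Pairwise (fun a b => k1 a < k1 b ∨ (k1 a = k1 b ∧ k2 a ≤ k2 b)) by
    exact h xs [] List.Pairwise.nil
  intro l
  induction l with
  | nil => intro acc h; simpa using h
  | cons x t ih => intro acc hp; exact ih _ (pv_insert2 k1 k2 x acc hp)

-- ---------- facts about the decorated chunk ----------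

lemma pv_dec_append (chunk : List (String × String)) (m : String × String) :
    pvDec (chunk ++ [m]) = pvDec chunk ++ [(m.1, (chunk.length : Int), m.2)] := by
  unfold pvDec
  rw [PySem.List.enumerate_append, List.map_append]
  simp [PySem.List.enumerate]

lemma pv_dec_mem (chunk : List (String × String)) :
    ∀ r ∈ pvDec chunk, 0 ≤ r.2.1 ∧ r.2.1 < (chunk.length : Int) := by
  induction chunk using List.reverseRecOn with
  | nil => simp [pvDec, PySem.List.enumerate]
  | append_singleton l m ih =>
    intro r hr
    rw [pv_dec_append] at hr
    rcases List.mem_append.mp hr with h | h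
    · have := ih r h
      simp only [List.length_append, List.length_cons, List.length_nil]
      push_cast
      omega
    · simp only [List.mem_singleton] at h
      subst h
      simp only [List.length_append, List.length_cons, List.length_nil]
      push_cast
      omega

lemma pv_dec_j_pairwise (chunk : List (String × String)) :
    (pvDec chunk).Pairwise (fun a b => a.2.1 < b.2.1) := by
  induction chunk using List.reverseRecOn with
  | nil => simp [pvDec, PySem.List.enumerate]
  | append_singleton l m ih =>
    rw [pv_dec_append]
    refine List.pairwise_append.mpr ⟨ih, by simp, ?_⟩
    intro a ha b hb
    simp only [List.mem_singleton] at hb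
    subst hb
    exact (pv_dec_mem l a ha).2

lemma pv_dec_fst (chunk : List (String × String)) :
    (pvDec chunk).map (fun r => r.1) = chunk.map Prod.fst := by
  induction chunk using List.reverseRecOn with
  | nil => simp [pvDec, PySem.List.enumerate]
  | append_singleton l m ih => rw [pv_dec_append]; simp [ih]

lemma pv_grp_key (chunk : List (String × String)) (p : String) :
    ∀ r ∈ pvGrp chunk p, r.1 = p := by
  intro r hr
  have := List.of_mem_filter hr
  simpa using this

lemma pv_grp_ne_nil (chunk : List (String × String)) (p : String) (hp : p ∈ pvP chunk) :
    pvGrp chunk p ≠ [] := by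
  have hp' : p ∈ chunk.map Prod.fst := (PySem.Set.mem_ofList _ _).mp hp
  rw [← pv_dec_fst] at hp'
  rcases List.mem_map.mp hp' with ⟨r, hr, hrp⟩
  have : r ∈ pvGrp chunk p := List.mem_filter.mpr ⟨hr, by simp [hrp]⟩
  exact List.ne_nil_of_mem this

lemma pv_dates_grp (chunk : List (String × String)) (p : String) :
    pvDates chunk p = (pvGrp chunk p).map (fun r => r.2.2) := by
  induction chunk using List.reverseRecOn with
  | nil => simp [pvDates, pvGrp, pvDec, PySem.List.enumerate]
  | append_singleton l m ih =>
    unfold pvDates pvGrp at *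
    rw [pv_dec_append, List.filter_append, List.map_append, List.filter_append, List.map_append, ih]
    by_cases h : m.1 = p <;> simp [h]

-- ---------- first-occurrence indices are strictly increasing along pvP ----------

lemma pv_grp_append (chunk : List (String × String)) (m : String × String) (q : String) :
    pvGrp (chunk ++ [m]) q
      = pvGrp chunk q ++ (if m.1 = q then [(m.1, (chunk.length : Int), m.2)] else []) := by
  unfold pvGrp
  rw [pv_dec_append, List.filter_append]
  by_cases h : m.1 = q <;> simp [h]

lemma pv_rec_append_stable (chunk : List (String × String)) (m : String × String) (q : String)
    (hq : pvGrp chunk q ≠ []) :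
    (pvRec (chunk ++ [m]) q).2.1 = (pvRec chunk q).2.1 := by
  unfold pvRec
  rw [pv_grp_append]
  rcases hg : pvGrp chunk q with _ | ⟨r, g⟩
  · exact absurd hg hq
  · by_cases h : m.1 = q <;> simp [h]

lemma pv_P_append (chunk : List (String × String)) (m : String × String) :
    pvP (chunk ++ [m]) = if m.1 ∈ chunk.map Prod.fst then pvP chunk else pvP chunk ++ [m.1] := by
  unfold pvP
  rw [List.map_append]
  simp only [List.map_cons, List.map_nil]
  rw [PySem.Set.ofList_append_singleton]
  by_cases h : m.1 ∈ chunk.map Prod.fst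
  · rw [if_pos h, PySem.Set.add_of_mem ((PySem.Set.mem_ofList _ _).mpr h)]
  · rw [if_neg h, PySem.Set.add_of_not_mem (fun hc => h ((PySem.Set.mem_ofList _ _).mp hc))]

lemma pv_F_pairwise (chunk : List (String × String)) :
    (pvP chunk).Pairwise (fun p q => (pvRec chunk p).2.1 < (pvRec chunk q).2.1) := by
  induction chunk using List.reverseRecOn with
  | nil => simp [pvP, PySem.Set.ofList]
  | append_singleton l m ih =>
    have hstable : ∀ q ∈ pvP l, (pvRec (l ++ [m]) q).2.1 = (pvRec l q).2.1 := by
      intro q hq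
      exact pv_rec_append_stable l m q (pv_grp_ne_nil l q hq)
    rw [pv_P_append]
    by_cases h : m.1 ∈ l.map Prod.fst
    · rw [if_pos h]
      refine ih.imp_of_mem ?_
      intro a b ha hb hab
      rw [hstable a ha, hstable b hb]
      exact hab
    · rw [if_neg h]
      refine List.pairwise_append.mpr ⟨ih.imp_of_mem (fun {a b} ha hb hab => by
        rw [hstable a ha, hstable b hb]; exact hab), by simp, ?_⟩
      intro a ha b hb
      simp only [List.mem_singleton] at hb
      subst hb
      rw [hstable a ha]
      -- F of the fresh person m.1 is l.length, every old F is smaller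
      have hnew : (pvRec (l ++ [m]) m.1).2.1 = (l.length : Int) := by
        unfold pvRec
        rw [pv_grp_append]
        have hgrp : pvGrp l m.1 = [] := by
          unfold pvGrp
          rw [List.filter_eq_nil_iff]
          intro r hr
          simp only [beq_iff_eq]
          intro hrp
          exact h (by rw [← pv_dec_fst]; exact List.mem_map.mpr ⟨r, hr, hrp⟩)
        rw [hgrp]
        simp
      rw [hnew]
      -- old F is the index of some element of pvDec l
      rcases hg : pvGrp l a with _ | ⟨r, g⟩
      · exact absurd hg (pv_grp_ne_nil l a ha)
      · have hr : r ∈ pvDec l := List.mem_of_mem_filter (hg ▸ List.mem_cons_self)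
        have := (pv_dec_mem l r hr).2
        unfold pvRec
        rw [hg]
        exact this

-- F is injective on pvP
lemma pv_F_inj (chunk : List (String × String)) {p q : String}
    (hp : p ∈ pvP chunk) (hq : q ∈ pvP chunk)
    (h : (pvRec chunk p).2.1 = (pvRec chunk q).2.1) : p = q := by
  have hnd : ((pvP chunk).map (fun p => (pvRec chunk p).2.1)).Nodup := by
    rw [List.Nodup, List.pairwise_map]
    exact (pv_F_pairwise chunk).imp (fun h => ne_of_lt h)
  exact List.inj_on_of_nodup_map hnd hp hq h

-- ---------- A's dict of date lists ----------

lemma pv_dates_append (l : List (String × String)) (m : String × String) (q : String) :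
    pvDates (l ++ [m]) q = pvDates l q ++ (if m.1 = q then [m.2] else []) := by
  unfold pvDates
  rw [List.filter_append]
  by_cases h : m.1 = q <;> simp [h]

lemma pv_items (chunk : List (String × String)) :
    (chunk.foldl (fun d m => d.modify m.1 [] (· ++ [m.2]))
        (PySem.Dict.empty : PySem.Dict String (List String))).items
      = (pvP chunk).map (fun p => (p, pvDates chunk p)) := by
  induction chunk using List.reverseRecOn with
  | nil => rfl
  | append_singleton l m ih =>
    rw [List.foldl_append, List.foldl_cons, List.foldl_nil]
    have hkeys : (l.foldl (fun d m => d.modify m.1 [] (· ++ [m.2]))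
        (PySem.Dict.empty : PySem.Dict String (List String))).keys = pvP l := by
      simp only [PySem.Dict.keys, ih, List.map_map]
      exact List.map_id _
    have hnd : (l.foldl (fun d m => d.modify m.1 [] (· ++ [m.2]))
        (PySem.Dict.empty : PySem.Dict String (List String))).keys.Nodup := by
      rw [hkeys]; exact PySem.Set.nodup_ofList _
    have hcont : (l.foldl (fun d m => d.modify m.1 [] (· ++ [m.2]))
        (PySem.Dict.empty : PySem.Dict String (List String))).contains m.1
        = decide (m.1 ∈ l.map Prod.fst) := by
      rw [PySem.Dict.contains_eq_decide_mem_keys, hkeys]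
      simp [pvP, PySem.Set.mem_ofList]
    by_cases hm : m.1 ∈ l.map Prod.fst
    · have hc : (l.foldl (fun d m => d.modify m.1 [] (· ++ [m.2]))
          (PySem.Dict.empty : PySem.Dict String (List String))).contains m.1 = true := by
        rw [hcont]; simpa using hm
      have hmemP : m.1 ∈ pvP l := (PySem.Set.mem_ofList _ _).mpr hm
      have hget : (l.foldl (fun d m => d.modify m.1 [] (· ++ [m.2]))
          (PySem.Dict.empty : PySem.Dict String (List String))).getD m.1 [] = pvDates l m.1 := by
        rw [PySem.Dict.getD_eq_get?_getD,
          PySem.Dict.get?_of_mem_items _ (by rw [ih]; exact List.mem_map.mpr ⟨m.1, hmemP, rfl⟩) hnd]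
        rfl
      show ((l.foldl (fun d m => d.modify m.1 [] (· ++ [m.2]))
          (PySem.Dict.empty : PySem.Dict String (List String))).insert m.1 _).items = _
      rw [PySem.Dict.items_insert_of_contains _ _ hc, hget, ih, List.map_map,
        pv_P_append, if_pos hm]
      refine List.map_congr_left ?_
      intro p hp
      by_cases hpm : p = m.1
      · subst hpm
        simp [pv_dates_append]
        
      · have hmp : m.1 ≠ p := fun h => hpm h.symm
        simp only [Function.comp_apply, beq_iff_eq, if_neg hpm, pv_dates_append, if_neg hmp,
          List.append_nil]
    · have hc : (l.foldl (fun d m => d.modify m.1 [] (· ++ [m.2]))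
          (PySem.Dict.empty : PySem.Dict String (List String))).contains m.1 = false := by
        rw [hcont]; simpa using hm
      have hget : (l.foldl (fun d m => d.modify m.1 [] (· ++ [m.2]))
          (PySem.Dict.empty : PySem.Dict String (List String))).getD m.1 [] = [] :=
        PySem.Dict.getD_of_not_contains _ _ hc
      show ((l.foldl (fun d m => d.modify m.1 [] (· ++ [m.2]))
          (PySem.Dict.empty : PySem.Dict String (List String))).insert m.1 _).items = _
      rw [PySem.Dict.items_insert_of_not_contains _ _ hc, hget, ih,
        pv_P_append, if_neg hm, List.map_append]
      have hdm : pvDates l m.1 = [] := by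
        unfold pvDates
        rw [List.filter_eq_nil_iff.mpr ?_]
        · rfl
        · intro r hr
          simp only [beq_iff_eq]
          exact fun h => hm (List.mem_map.mpr ⟨r, hr, h⟩)
      refine congrArg₂ (· ++ ·) ?_ ?_
      · refine List.map_congr_left ?_
        intro p hp
        have hpm : m.1 ≠ p := fun h => hm (h ▸ (PySem.Set.mem_ofList _ _).mp hp)
        simp [pv_dates_append, hpm]
      · simp [pv_dates_append, hdm]

-- ---------- B1: the (person, position) sort is the groups in person order ----------

lemma pv_partition :
    ∀ (K : List String), K.Nodup → ∀ (l : List (String × Int × String)),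
      (∀ r ∈ l, r.1 ∈ K) →
      (K.flatMap (fun p => l.filter (fun r => r.1 == p))).Perm l := by
  intro K
  induction K with
  | nil =>
    intro _ l hl
    cases l with
    | nil => simp
    | cons a t => exact absurd (hl a List.mem_cons_self) (by simp)
  | cons k K' ih =>
    intro hnd l hl
    rcases List.nodup_cons.mp hnd with ⟨hk, hnd'⟩
    rw [List.flatMap_cons]
    have hsub : ∀ p ∈ K',
        l.filter (fun r => r.1 == p)
          = (l.filter (fun r => !(r.1 == k))).filter (fun r => r.1 == p) := by
      intro p hp
      rw [List.filter_filter]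
      refine List.filter_congr ?_
      intro r _
      by_cases h : r.1 = p
      · have hne : (p : String) ≠ k := fun hh => hk (hh ▸ hp)
        simp [h, hne]
      · simp [h]
    have heq : K'.flatMap (fun p => l.filter (fun r => r.1 == p))
        = K'.flatMap (fun p => (l.filter (fun r => !(r.1 == k))).filter (fun r => r.1 == p)) := by
      simp only [List.flatMap_def]
      exact congrArg List.flatten (List.map_congr_left hsub)
    have hperm2 : (K'.flatMap (fun p => l.filter (fun r => r.1 == p))).Perm
        (l.filter (fun r => !(r.1 == k))) := by
      rw [heq]
      refine ih hnd' _ ?_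
      intro r hr
      have hl' := hl r (List.mem_of_mem_filter hr)
      have hrk : ¬(r.1 == k) = true := by simpa using (List.of_mem_filter hr)
      rcases List.mem_cons.mp hl' with h | h
      · exact absurd (by simp [h]) hrk
      · exact h
    exact ((hperm2.append_left (l.filter (fun r => r.1 == k))).trans
      (List.filter_append_perm (fun r => r.1 == k) l))

lemma pv_flatMap_pairwise (chunk : List (String × String)) (Ps : List String)
    (hPs : Ps.Pairwise (· < ·)) :
    (Ps.flatMap (pvGrp chunk)).Pairwise
      (fun a b => a.1 < b.1 ∨ (a.1 = b.1 ∧ a.2.1 ≤ b.2.1)) := by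
  induction Ps with
  | nil => simp
  | cons p rest ih =>
    rcases List.pairwise_cons.mp hPs with ⟨hp, hrest⟩
    rw [List.flatMap_cons]
    refine List.pairwise_append.mpr ⟨?_, ih hrest, ?_⟩
    · refine ((pv_dec_j_pairwise chunk).filter _).imp_of_mem ?_
      intro a b ha hb hab
      exact Or.inr ⟨(pv_grp_key chunk p a ha).trans (pv_grp_key chunk p b hb).symm, hab.le⟩
    · intro a ha b hb
      rcases List.mem_flatMap.mp hb with ⟨q, hq, hbq⟩
      rw [pv_grp_key chunk p a ha, pv_grp_key chunk q b hbq]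
      exact Or.inl (hp q hq)

lemma pv_sortedP_lt (chunk : List (String × String)) :
    (PySem.List.sorted (pvP chunk) (fun x => x) false).Pairwise (· < ·) := by
  have hle := PySem.List.sorted_pairwise (pvP chunk) (fun x => x)
  have hnd : (PySem.List.sorted (pvP chunk) (fun x => x) false).Nodup :=
    (PySem.List.sorted_perm (pvP chunk) (fun x => x) false).nodup_iff.mpr
      (PySem.Set.nodup_ofList _)
  exact (hle.and hnd).imp (fun h => lt_of_le_of_ne h.1 h.2)

lemma pv_dec_key_mem (chunk : List (String × String)) :
    ∀ r ∈ pvDec chunk, r.1 ∈ pvP chunk := by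
  intro r hr
  refine (PySem.Set.mem_ofList _ _).mpr ?_
  rw [← pv_dec_fst]
  exact List.mem_map.mpr ⟨r, hr, rfl⟩

lemma pv_rows (chunk : List (String × String)) :
    PySem.List.sorted2 (pvDec chunk) (fun r => r.1) (fun r => r.2.1) false
      = (PySem.List.sorted (pvP chunk) (fun x => x) false).flatMap (pvGrp chunk) := by
  have hjnd : ((pvDec chunk).map (fun r => r.2.1)).Nodup := by
    rw [List.Nodup, List.pairwise_map]
    exact (pv_dec_j_pairwise chunk).imp (fun h => ne_of_lt h)
  have hperm1 : (PySem.List.sorted2 (pvDec chunk) (fun r => r.1) (fun r => r.2.1) false).Perm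
      (pvDec chunk) := PySem.List.sorted2_perm _ _ _ _
  have hperm2 : ((PySem.List.sorted (pvP chunk) (fun x => x) false).flatMap (pvGrp chunk)).Perm
      (pvDec chunk) := by
    refine List.Perm.trans (List.Perm.flatMap (PySem.List.sorted_perm (pvP chunk) (fun x => x) false)
      (fun a _ => List.Perm.refl _)) ?_
    exact pv_partition (pvP chunk) (PySem.Set.nodup_ofList _) (pvDec chunk)
      (pv_dec_key_mem chunk)
  refine List.Perm.eq_of_pairwise
    (le := fun a b => a.1 < b.1 ∨ (a.1 = b.1 ∧ a.2.1 ≤ b.2.1)) ?_ ?_ ?_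
    (hperm1.trans hperm2.symm)
  · intro a b ha hb hab hba
    have ha' : a ∈ pvDec chunk := hperm1.mem_iff.mp ha
    have hb' : b ∈ pvDec chunk := hperm2.mem_iff.mp hb
    have h1 : a.1 = b.1 := by
      rcases hab with h | ⟨h, _⟩
      · rcases hba with h' | ⟨h', _⟩
        · exact absurd (h.trans h') (lt_irrefl _)
        · exact h'.symm
      · exact h
    have h2 : a.2.1 = b.2.1 := by
      rcases hab with h | ⟨_, h⟩
      · exact absurd (h1 ▸ h) (lt_irrefl _)
      · rcases hba with h' | ⟨_, h'⟩
        · exact absurd (h1 ▸ h') (lt_irrefl _)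
        · exact le_antisymm h h'
    exact List.inj_on_of_nodup_map hjnd ha' hb' h2
  · exact pv_sorted2_pairwise (pvDec chunk) (fun r => r.1) (fun r => r.2.1)
  · exact pv_flatMap_pairwise chunk _ (pv_sortedP_lt chunk)

-- ---------- B2: the run-collapsing scan on the grouped rows ----------

lemma pv_fold_run (p : String) (j : Int) (g : List (String × Int × String))
    (hg : ∀ r ∈ g, r.1 = p) (l : List (String × Int × String)) :
    ∀ b, g.foldl pvStep (l, some (b, j, p))
      = (l, some (g.foldl (fun acc s => if acc < s.2.2 then s.2.2 else acc) b, j, p)) := by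
  induction g with
  | nil => intro b; rfl
  | cons r t ih =>
    intro b
    have hr : r.1 = p := hg r List.mem_cons_self
    simp only [List.foldl_cons]
    rw [show pvStep (l, some (b, j, p)) r
        = (l, some ((if b < r.2.2 then r.2.2 else b), j, p)) by simp [pvStep, hr]]
    exact ih (fun s hs => hg s (List.mem_cons_of_mem _ hs)) _

lemma pv_group_flatMap (chunk : List (String × String)) :
    ∀ (Ps : List String), Ps.Nodup → (∀ p ∈ Ps, pvGrp chunk p ≠ []) →
    ∀ (st : List (String × Int × String) × Option (String × Int × String)),
      (∀ c, st.2 = some c → c.2.2 ∉ Ps) →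
      pvClose ((Ps.flatMap (pvGrp chunk)).foldl pvStep st) = pvClose st ++ Ps.map (pvRec chunk) := by
  intro Ps
  induction Ps with
  | nil => intro _ _ st _; simp
  | cons p rest ih =>
    intro hnd hne st hst
    rcases List.nodup_cons.mp hnd with ⟨hpnot, hndr⟩
    rw [List.flatMap_cons, List.foldl_append]
    rcases hg : pvGrp chunk p with _ | ⟨r, g⟩
    · exact absurd hg (hne p List.mem_cons_self)
    · have hr1 : r.1 = p := pv_grp_key chunk p r (hg ▸ List.mem_cons_self)
      have hgk : ∀ s ∈ g, s.1 = p := fun s hs => pv_grp_key chunk p s (hg ▸ List.mem_cons_of_mem _ hs)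
      -- the first element of the run either starts cur or flushes the previous cur
      have hstep : (pvStep st r) = (pvClose st, some (r.2.2, r.2.1, p)) := by
        rcases hc : st.2 with _ | c
        · simp [pvStep, pvClose, hc, hr1]
        · have hcpne : c.2.2 ≠ p := fun h => hst c hc (h ▸ List.mem_cons_self)
          simp [pvStep, pvClose, hc, hr1, Ne.symm hcpne]
      rw [List.foldl_cons, hstep, pv_fold_run p r.2.1 g hgk _ r.2.2]
      rw [ih hndr (fun q hq => hne q (List.mem_cons_of_mem _ hq)) _ ?_]
      · rw [show pvClose (pvClose st, some (g.foldl (fun acc s => if acc < s.2.2 then s.2.2 else acc) r.2.2, r.2.1, p)) = pvClose st ++ [pvRec chunk p] by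
          simp [pvClose, pvRec, hg]]
        simp
      · intro c hc
        simp only [Option.some_inj] at hc
        subst hc
        simpa using hpnot

-- ---------- the per-chunk equality ----------

lemma pv_rec_22 (chunk : List (String × String)) (p : String) : (pvRec chunk p).2.2 = p := by
  unfold pvRec
  rcases pvGrp chunk p with _ | ⟨r, g⟩ <;> rfl

lemma pv_if_max (b x : String) : (if b < x then x else b) = max b x := by
  rcases lt_or_ge b x with h | h
  · rw [if_pos h, max_eq_right h.le]
  · rw [if_neg (not_lt.mpr h), max_eq_left h]

lemma pv_empty_le (s : String) : "" ≤ s := by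
  refine le_of_not_gt ?_
  intro h
  rw [String.lt_iff_toList_lt] at h
  simp at h

lemma pv_pyGetD_neg_one {α : Type} (ys : List α) (d : α) :
    PySem.List.pyGetD ys (-1) d = ys.getLast?.getD d := by
  cases ys with
  | nil => simp [PySem.List.pyGetD, PySem.List.pyGet?, PySem.List.pyIdx?]
  | cons y t => simp [PySem.List.pyGetD, PySem.List.pyGet?, PySem.List.pyIdx?, List.getLast?_eq_getElem?]

lemma pv_last_pairwise (ys : List String) (hp : ys.Pairwise (· ≤ ·)) :
    ∀ d : String, (∀ x ∈ ys, d ≤ x) → ys.getLast?.getD d = ys.foldl max d := by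
  induction ys with
  | nil => intro d _; simp
  | cons y t ih =>
    intro d hd
    rcases List.pairwise_cons.mp hp with ⟨hy, ht⟩
    cases t with
    | nil => simp [max_eq_right (hd y (by simp))]
    | cons z t' =>
      have := ih ht (max d y) (by
        intro x hx
        exact max_le (hd x (List.mem_cons_of_mem _ hx)) (hy x hx))
      simpa using this

-- A's "sorted(dates)[-1]" for a person of the chunk is B's running max (pvRec …).1
lemma pv_thinned (chunk : List (String × String)) (p : String) (hp : p ∈ pvP chunk) :
    PySem.List.pyGetD (PySem.List.sorted (pvDates chunk p) (fun x => x) false) (-1) ""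
      = (pvRec chunk p).1 := by
  rw [pv_pyGetD_neg_one]
  rw [pv_last_pairwise _ (PySem.List.sorted_pairwise (pvDates chunk p) (fun x => x)) ""
    (fun x _ => pv_empty_le x)]
  rw [(PySem.List.sorted_perm (pvDates chunk p) (fun x => x) false).foldl_eq ""]
  rw [pv_dates_grp]
  rcases hg : pvGrp chunk p with _ | ⟨r, g⟩
  · exact absurd hg (pv_grp_ne_nil chunk p hp)
  · unfold pvRec
    rw [hg]
    simp only [List.map_cons, List.foldl_cons, List.foldl_map]
    rw [max_eq_right (pv_empty_le r.2.2)]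
    exact (PySem.List.foldl_congr_mem g
      (fun acc s => if acc < s.2.2 then s.2.2 else acc)
      (fun acc s => max acc s.2.2) r.2.2 (fun acc s _ => pv_if_max acc s.2.2)).symm

-- the central per-chunk fact: A's stable date sort of the thinned pairs equals
-- B's (date, firstPosition) sort of the run records, undecorated
lemma pv_main (chunk : List (String × String)) :
    PySem.List.sorted ((pvP chunk).map (pvE chunk)) (fun x => x.2) false
      = (PySem.List.sorted2
          ((PySem.List.sorted (pvP chunk) (fun x => x) false).map (pvRec chunk))
          (fun r => r.1) (fun r => r.2.1) false).map (fun r => (r.2.2, r.1)) := by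
  have hmap1 : ((pvP chunk).map (pvE chunk)).Pairwise
      (fun a b => (pvRec chunk a.1).2.1 < (pvRec chunk b.1).2.1) := by
    rw [List.pairwise_map]
    exact pv_F_pairwise chunk
  -- l₁ ~ base
  have hperm1 : (PySem.List.sorted ((pvP chunk).map (pvE chunk)) (fun x => x.2) false).Perm
      ((pvP chunk).map (pvE chunk)) := PySem.List.sorted_perm _ _ _
  -- l₂ ~ base
  have hu : ∀ p, (fun r : String × Int × String => (r.2.2, r.1)) (pvRec chunk p) = pvE chunk p := by
    intro p
    show ((pvRec chunk p).2.2, (pvRec chunk p).1) = pvE chunk p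
    unfold pvE
    rw [pv_rec_22 chunk p]
  have hperm2 : ((PySem.List.sorted2
        ((PySem.List.sorted (pvP chunk) (fun x => x) false).map (pvRec chunk))
        (fun r => r.1) (fun r => r.2.1) false).map (fun r => (r.2.2, r.1))).Perm
      ((pvP chunk).map (pvE chunk)) := by
    refine List.Perm.trans
      ((PySem.List.sorted2_perm
        ((PySem.List.sorted (pvP chunk) (fun x => x) false).map (pvRec chunk))
        (fun r => r.1) (fun r => r.2.1) false).map (fun r => (r.2.2, r.1))) ?_
    rw [List.map_map,
      show ((fun r : String × Int × String => (r.2.2, r.1)) ∘ pvRec chunk) = pvE chunk from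
        funext hu]
    exact (PySem.List.sorted_perm (pvP chunk) (fun x => x) false).map _
  refine List.Perm.eq_of_pairwise (le := pvLe chunk) ?_ ?_ ?_ (hperm1.trans hperm2.symm)
  · -- antisymmetry on the members
    intro a b ha hb hab hba
    rcases List.mem_map.mp (hperm1.mem_iff.mp ha) with ⟨p, hp, rfl⟩
    rcases List.mem_map.mp (hperm2.mem_iff.mp hb) with ⟨q, hq, rfl⟩
    have h2 : (pvE chunk p).2 = (pvE chunk q).2 := by
      rcases hab with h | ⟨h, _⟩
      · rcases hba with h' | ⟨h', _⟩
        · exact absurd (h.trans h') (lt_irrefl _)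
        · exact h'.symm
      · exact h
    have hF : (pvRec chunk p).2.1 = (pvRec chunk q).2.1 := by
      rcases hab with h | ⟨_, h⟩
      · exact absurd (h2 ▸ h) (lt_irrefl _)
      · rcases hba with h' | ⟨_, h'⟩
        · exact absurd (h2 ▸ h') (lt_irrefl _)
        · exact le_antisymm h h'
    have : p = q := pv_F_inj chunk hp hq hF
    rw [this]
  · -- A's stable sort is pairwise in the lex (date, firstPos) order
    refine (pv_sorted_stab (fun x : String × String => x.2)
      (fun a => (pvRec chunk a.1).2.1) _ hmap1).imp ?_
    intro a b h
    rcases h with h | ⟨h, h'⟩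
    · exact Or.inl h
    · exact Or.inr ⟨h, h'.le⟩
  · -- B's (date, firstPos) sort, undecorated, is pairwise in the same order
    rw [List.pairwise_map]
    refine (pv_sorted2_pairwise
      ((PySem.List.sorted (pvP chunk) (fun x => x) false).map (pvRec chunk))
      (fun r => r.1) (fun r => r.2.1)).imp_of_mem ?_
    intro r s hr hs hrs
    have hrm := (PySem.List.sorted2_perm
      ((PySem.List.sorted (pvP chunk) (fun x => x) false).map (pvRec chunk))
      (fun r => r.1) (fun r => r.2.1) false).mem_iff.mp hr
    have hsm := (PySem.List.sorted2_perm
      ((PySem.List.sorted (pvP chunk) (fun x => x) false).map (pvRec chunk))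
      (fun r => r.1) (fun r => r.2.1) false).mem_iff.mp hs
    rcases List.mem_map.mp hrm with ⟨p, _, rfl⟩
    rcases List.mem_map.mp hsm with ⟨q, _, rfl⟩
    unfold pvLe
    rw [show ((pvRec chunk p).2.2, (pvRec chunk p).1).2 = (pvRec chunk p).1 from rfl,
      show ((pvRec chunk q).2.2, (pvRec chunk q).1).2 = (pvRec chunk q).1 from rfl,
      show ((pvRec chunk p).2.2, (pvRec chunk p).1).1 = (pvRec chunk p).2.2 from rfl,
      show ((pvRec chunk q).2.2, (pvRec chunk q).1).1 = (pvRec chunk q).2.2 from rfl,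
      pv_rec_22 chunk p, pv_rec_22 chunk q]
    exact hrs

-- ===== VERDICT (by name: the statement is the Claim_ definition above) =====
theorem thinM_spec : Claim_equal_thinM := by
  intro chunks _
  show thinM chunks = thinM_alt chunks
  unfold thinM thinM_alt
  refine PySem.List.foldl_congr_mem _ _ _ _ ?_
  intro acc ic _
  simp only
  -- A's dict of date lists, thinned
  rw [pv_items ic.2]
  rw [PySem.List.foldl_append_singleton_eq_map
    (f := fun pd : String × List String =>
      (pd.1, PySem.List.pyGetD (PySem.List.sorted pd.2 (fun x => x) false) (-1) ""))]
  rw [List.nil_append, List.map_map]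
  have hthin : (pvP ic.2).map
      ((fun pd : String × List String =>
        (pd.1, PySem.List.pyGetD (PySem.List.sorted pd.2 (fun x => x) false) (-1) "")) ∘
        (fun p => (p, pvDates ic.2 p)))
      = (pvP ic.2).map (pvE ic.2) := by
    refine List.map_congr_left ?_
    intro p hp
    show (p, PySem.List.pyGetD (PySem.List.sorted (pvDates ic.2 p) (fun x => x) false) (-1) "")
      = pvE ic.2 p
    unfold pvE
    rw [pv_thinned ic.2 p hp]
  rw [hthin]
  -- B's rows, grouped
  rw [show ((PySem.List.enumerate ic.2).map (fun jm => (jm.2.1, jm.1, jm.2.2))) = pvDec ic.2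
    from rfl]
  rw [pv_rows ic.2]
  have hnd : (PySem.List.sorted (pvP ic.2) (fun x => x) false).Nodup :=
    (PySem.List.sorted_perm (pvP ic.2) (fun x => x) false).nodup_iff.mpr
      (PySem.Set.nodup_ofList _)
  have hne : ∀ p ∈ PySem.List.sorted (pvP ic.2) (fun x => x) false, pvGrp ic.2 p ≠ [] := by
    intro p hp
    exact pv_grp_ne_nil ic.2 p
      ((PySem.List.sorted_perm (pvP ic.2) (fun x => x) false).mem_iff.mp hp)
  have hrecs : pvGroup ((PySem.List.sorted (pvP ic.2) (fun x => x) false).flatMap (pvGrp ic.2))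
      = (PySem.List.sorted (pvP ic.2) (fun x => x) false).map (pvRec ic.2) := by
    unfold pvGroup
    rw [pv_group_flatMap ic.2 _ hnd hne ([], none) (fun c hc => by cases hc)]
    rfl
  rw [hrecs]
  -- both emission loops, over the same sorted list
  rw [pv_main ic.2]
  rw [PySem.List.foldl_append_singleton_eq_map
    (f := fun m : String × String =>
      (m, if (ic.1 == (chunks.length : Int) - 1) = true then (2 : Int) else 1))]
  rw [PySem.List.foldl_append_singleton_eq_map
    (f := fun r : String × Int × String =>
      ((r.2.2, r.1), if (ic.1 == (chunks.length : Int) - 1) = true then (2 : Int) else 1))]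
  rw [List.map_map]
  rfl
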